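-- pv_equiv track=rewrite | github.com/ZeyuLing/LeetCode | 2165_isNumber.py | checkPart
-- ===== SOURCE A (Python) =====
-- def checkPart(sub, is_ex):
--     if sub == "":       #没有e且为空
--         if (is_ex):
--             return True
--         else:
--             return False
--     count_dot = 0
--     count_sign = 0
--     hasNum= False
--     for char in sub:
--         # 不是数字字符
--         if not (('0' <= char <= '9') or char == '.' or char == '+' or char == '-'):
--             return False
--         if char == '+' or char == '-':
--             count_sign += 1
--         if char == '.':
--             count_dot += 1
--         if (count_sign > 1): return False
--         if (count_dot > 1): return False
--         if '0' <= char <= '9':hasNum=True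
--     if not hasNum: return False  # 不能只有符号
--     if is_ex:  # 指数部分 必须是整数
--         if sub.count('.') >= 1: return False
--     if count_sign == 1:  # 有符号必须是第一个 且不能只有符号
--         if (sub[0] != '+' and sub[0] != '-') or len(sub)==1: return False
--
--
--     return True
-- ===== SOURCE B (Python) =====
-- def checkPart(sub, is_ex):
--     if sub == "":
--         return bool(is_ex)
--     body = sub[1:] if sub[0] in "+-" else sub
--     digits = [c for c in body if c != '.']
--     dots = len(body) - len(digits)
--     if is_ex and dots > 0:
--         return False
--     return dots <= 1 and digits != [] and all('0' <= c <= '9' for c in digits)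
-- ===== Notes on version B (the rewrite author's own statement) =====
-- stated objective: simpler
-- what changed: Replaced the stateful character scan with dot/sign counters, a hasNum flag and post-hoc checks by stripping an optional leading sign and then testing that the body minus at most one dot is a nonempty run of digits (a filter plus an all-digits check).
import Mathlib
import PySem

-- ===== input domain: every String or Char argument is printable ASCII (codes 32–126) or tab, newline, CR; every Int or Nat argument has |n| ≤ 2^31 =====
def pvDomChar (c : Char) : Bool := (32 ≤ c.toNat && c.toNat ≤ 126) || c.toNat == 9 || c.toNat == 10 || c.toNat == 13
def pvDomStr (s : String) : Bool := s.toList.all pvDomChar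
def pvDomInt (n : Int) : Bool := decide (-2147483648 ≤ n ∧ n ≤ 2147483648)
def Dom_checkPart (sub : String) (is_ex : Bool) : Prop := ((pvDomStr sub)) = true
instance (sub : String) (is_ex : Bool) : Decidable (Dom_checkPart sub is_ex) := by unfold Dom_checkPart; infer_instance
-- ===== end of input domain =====

-- B replaces A's stateful character scan (dot/sign counters, hasNum flag, post-checks)
-- by stripping an optional leading sign and filtering out at most one dot, then checking
-- the remainder is a nonempty run of digits (objective: simpler).

-- ===== PORT A =====
-- A's for-loop with its three accumulators and early returns: none = an early 'return False'.
def checkPartLoop : List Char → Nat → Nat → Bool → Option (Nat × Nat × Bool)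
  | [], count_dot, count_sign, hasNum => some (count_dot, count_sign, hasNum)
  | c :: rest, count_dot, count_sign, hasNum =>
    if !(('0' ≤ c && c ≤ '9') || c == '.' || c == '+' || c == '-') then none
    else
      let count_sign' := if c == '+' || c == '-' then count_sign + 1 else count_sign
      let count_dot' := if c == '.' then count_dot + 1 else count_dot
      if count_sign' > 1 then none
      else if count_dot' > 1 then none
      else checkPartLoop rest count_dot' count_sign' (if '0' ≤ c && c ≤ '9' then true else hasNum)

def checkPart (sub : String) (is_ex : Bool) : Bool :=
  if sub == "" then (if is_ex then true else false)
  else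
    match checkPartLoop sub.toList 0 0 false with
    | none => false
    | some (_count_dot, count_sign, hasNum) =>
      if !hasNum then false
      else if is_ex && decide (1 ≤ PySem.Str.count sub ".") then false
      -- sub[0]: sub ≠ "" in this branch, so pyGet? is some and getD is exact
      else if count_sign == 1 &&
          ((!((PySem.List.pyGet? sub.toList 0).getD ' ' == '+')
             && !((PySem.List.pyGet? sub.toList 0).getD ' ' == '-'))
            || PySem.Str.len sub == 1) then false
      else true

-- ===== PORT B =====
def checkPart_alt (sub : String) (is_ex : Bool) : Bool :=
  if sub == "" then is_ex
  else
    -- sub[0]: sub ≠ "" here, so pyGet? is some and getD is exact; sub[1:] is slice 1 none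
    let l := sub.toList
    let body := if (PySem.List.pyGet? l 0).getD ' ' == '+' || (PySem.List.pyGet? l 0).getD ' ' == '-'
                then PySem.List.slice l (some 1) none else l
    let digits := body.filter (fun c => !(c == '.'))
    let dots := body.length - digits.length
    if is_ex && dots > 0 then false
    else decide (dots ≤ 1) && !(digits == []) && digits.all (fun c => '0' ≤ c && c ≤ '9')

-- ===== PRECONDITION & SPEC =====
def Spec_checkPart (sub : String) (is_ex : Bool) (out : Bool) : Prop := out = checkPart_alt sub is_ex
instance (sub : String) (is_ex : Bool) (out : Bool) : Decidable (Spec_checkPart sub is_ex out) := by unfold Spec_checkPart; infer_instance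

-- ===== CLAIM (what is proved, stated in full; the proofs are below) =====
def Claim_equal_checkPart : Prop := ∀ (sub : String) (is_ex : Bool), Dom_checkPart sub is_ex → Spec_checkPart sub is_ex (checkPart sub is_ex)

-- ===== LEMMAS AND PROOFS =====

def pvValid (c : Char) : Bool := ('0' ≤ c && c ≤ '9') || c == '.' || c == '+' || c == '-'
def pvDigit (c : Char) : Bool := '0' ≤ c && c ≤ '9'
def pvSign (c : Char) : Bool := c == '+' || c == '-'

-- the master proposition both programs decide on a nonempty string h :: t
abbrev pvM (h : Char) (t : List Char) (is_ex : Bool) : Prop :=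
  (h :: t).all pvValid = true ∧ (h :: t).count '.' <= 1
    ∧ (h :: t).countP (fun c => pvSign c) <= 1
    ∧ (h :: t).any pvDigit = true ∧ (is_ex = true → (h :: t).count '.' = 0)
    ∧ ((h :: t).countP (fun c => pvSign c) = 1 → pvSign h = true ∧ (h :: t).length ≠ 1)

-- the sign-free core proposition B decides on the body
abbrev pvCore (b : List Char) (is_ex : Bool) : Prop :=
  b.all pvValid = true ∧ b.count '.' <= 1 ∧ b.countP (fun c => pvSign c) = 0
    ∧ b.any pvDigit = true ∧ (is_ex = true → b.count '.' = 0)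

-- PySem's substring count, specialised to a single-character needle, is List.count.
theorem count_go_singleton (c : Char) (fuel : Nat) (l : List Char) (acc : Nat)
    (h : l.length <= fuel) :
    PySem.Chars.count.go [c] fuel l acc = acc + l.count c := by
  induction fuel generalizing l acc with
  | zero =>
    have : l = [] := List.eq_nil_of_length_eq_zero (Nat.le_zero.mp h)
    subst this; simp [PySem.Chars.count.go]
  | succ n ih =>
    cases l with
    | nil => simp [PySem.Chars.count.go]
    | cons x t =>
      simp only [PySem.Chars.count.go]
      by_cases hx : c = x
      · subst hx
        simp only [List.isPrefixOf, BEq.rfl, Bool.true_and, List.isPrefixOf_nil_left, if_pos]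
        rw [ih]
        · simp [List.count_cons]; omega
        · simpa using Nat.le_of_succ_le_succ h
      · have hp : ([c].isPrefixOf (x :: t)) = false := by
          simp [List.isPrefixOf, hx]
        rw [hp]
        simp only [Bool.false_eq_true, if_false]
        rw [ih]
        · simp [Ne.symm hx]
        · simpa using Nat.le_of_succ_le_succ h

theorem count_singleton (c : Char) (l : List Char) :
    PySem.Chars.count l [c] = l.count c := by
  simp [PySem.Chars.count]
  simpa using count_go_singleton c l.length l 0 le_rfl

-- counting helpers for one cons step
theorem count_cons_dot (c : Char) (t : List Char) (h : (c == '.') = true) :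
    (c :: t).count '.' = t.count '.' + 1 := by
  simp at h; simp [List.count_cons, h]

theorem count_cons_not_dot (c : Char) (t : List Char) (h : (c == '.') = false) :
    (c :: t).count '.' = t.count '.' := by
  simp at h; simp [List.count_cons, h]

theorem countP_cons_sign (c : Char) (t : List Char) (h : (c == '+' || c == '-') = true) :
    (c :: t).countP (fun c => pvSign c) = t.countP (fun c => pvSign c) + 1 := by
  simp [List.countP_cons, pvSign, h]

theorem countP_cons_not_sign (c : Char) (t : List Char) (h : (c == '+' || c == '-') = false) :
    (c :: t).countP (fun c => pvSign c) = t.countP (fun c => pvSign c) := by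
  simp [List.countP_cons, pvSign, h]

-- character facts used below
theorem sign_not_dot (c : Char) (h : (c == '+' || c == '-') = true) : (c == '.') = false := by
  simp only [Bool.or_eq_true, beq_iff_eq, decide_eq_true_eq] at h
  rcases h with rfl | rfl <;> rfl

theorem sign_not_digit (c : Char) (h : (c == '+' || c == '-') = true) :
    ('0' ≤ c && c ≤ '9') = false := by
  simp only [Bool.or_eq_true, beq_iff_eq, decide_eq_true_eq] at h
  rcases h with rfl | rfl <;> rfl

theorem sign_valid (c : Char) (h : (c == '+' || c == '-') = true) : pvValid c = true := by
  simp only [Bool.or_eq_true, beq_iff_eq, decide_eq_true_eq] at h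
  rcases h with rfl | rfl <;> rfl

theorem dot_not_digit (c : Char) (h : (c == '.') = true) : ('0' ≤ c && c ≤ '9') = false := by
  simp only [beq_iff_eq, decide_eq_true_eq] at h
  subst h; rfl

-- the loop computes: validity of every char, final counters <= 1, and the digit flag
theorem checkPartLoop_char (t : List Char) (cd cs : Nat) (hn : Bool)
    (hcd : cd <= 1) (hcs : cs <= 1) :
    checkPartLoop t cd cs hn =
      if t.all pvValid = true ∧ cd + t.count '.' <= 1 ∧ cs + t.countP (fun c => pvSign c) <= 1
      then some (cd + t.count '.', cs + t.countP (fun c => pvSign c), hn || t.any pvDigit)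
      else none := by
  induction t generalizing cd cs hn with
  | nil => simp [checkPartLoop, hcd, hcs]
  | cons c t ih =>
    by_cases hv : pvValid c = true
    · simp only [checkPartLoop, pvValid] at hv ⊢
      rw [if_neg (by simp [hv])]
      by_cases hsg : (c == '+' || c == '-') = true
      · have hdt : (c == '.') = false := sign_not_dot c hsg
        have hdg : ('0' ≤ c && c ≤ '9') = false := sign_not_digit c hsg
        rw [count_cons_not_dot c t hdt, countP_cons_sign c t hsg]
        simp only [hsg, hdt, hdg, if_true, Bool.false_eq_true, if_false]
        by_cases hs1 : cs + 1 > 1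
        · rw [if_pos hs1, if_neg]
          rintro ⟨-, -, h2⟩
          omega
        · rw [if_neg hs1, if_neg (by omega)]
          rw [ih cd (cs + 1) hn (by omega) (by omega)]
          have hall : ((c :: t).all pvValid) = t.all pvValid := by
            simp [List.all_cons, pvValid, hv]
          have hany : ((c :: t).any pvDigit) = t.any pvDigit := by
            simp [List.any_cons, pvDigit, hdg]
          rw [hall, hany]
          have e : cs + 1 + t.countP (fun c => pvSign c)
              = cs + (t.countP (fun c => pvSign c) + 1) := by omega
          rw [e]
      · by_cases hdt : (c == '.') = true
        · have hdg : ('0' ≤ c && c ≤ '9') = false := dot_not_digit c hdt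
          rw [count_cons_dot c t hdt, countP_cons_not_sign c t (by simpa using hsg)]
          simp only [hsg, hdt, hdg, if_true, Bool.false_eq_true, if_false]
          rw [if_neg (by omega)]
          by_cases hd1 : cd + 1 > 1
          · rw [if_pos hd1, if_neg]
            rintro ⟨-, h1, -⟩
            omega
          · rw [if_neg hd1]
            rw [ih (cd + 1) cs hn (by omega) (by omega)]
            have hall : ((c :: t).all pvValid) = t.all pvValid := by
              simp [List.all_cons, pvValid, hv]
            have hany : ((c :: t).any pvDigit) = t.any pvDigit := by
              simp [List.any_cons, pvDigit, hdg]
            rw [hall, hany]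
            have e : cd + 1 + t.count '.' = cd + (t.count '.' + 1) := by omega
            rw [e]
        · have hdg : ('0' ≤ c && c ≤ '9') = true := by
            simp only [Bool.or_eq_true] at hv hsg
            rcases hv with ((h | h) | h) | h
            · exact h
            · exact absurd h (by simpa using hdt)
            · exact absurd (Or.inl (by simpa using h)) (by simpa using hsg)
            · exact absurd (Or.inr (by simpa using h)) (by simpa using hsg)
          rw [count_cons_not_dot c t (by simpa using hdt), countP_cons_not_sign c t (by simpa using hsg)]
          simp only [hsg, hdt, hdg, if_true, Bool.false_eq_true, if_false]
          rw [if_neg (by omega), if_neg (by omega)]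
          rw [ih cd cs true hcd hcs]
          have hall : ((c :: t).all pvValid) = t.all pvValid := by
            simp [List.all_cons, pvValid, hv]
          have hany : (true || t.any pvDigit) = (hn || (c :: t).any pvDigit) := by
            simp [List.any_cons, pvDigit, hdg]
          rw [hall, hany]
    · have hv' : (('0' ≤ c && c ≤ '9') || c == '.' || c == '+' || c == '-') = false := by
        simp only [pvValid] at hv
        exact Bool.eq_false_iff.mpr hv
      simp only [checkPartLoop]
      rw [if_pos (by simp [hv']), if_neg]
      rintro ⟨h0, -⟩
      simp only [List.all_cons, Bool.and_eq_true] at h0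
      exact hv h0.1

-- a valid non-sign non-dot char is a digit, and a digit is neither sign nor dot
theorem digit_of_valid (c : Char) (hv : pvValid c = true) (hs : pvSign c = false)
    (hd : (c == '.') = false) : pvDigit c = true := by
  simp only [pvValid, Bool.or_eq_true] at hv
  simp only [pvSign, Bool.or_eq_false_iff] at hs
  rcases hv with ((hh | hh) | hh) | hh
  · simpa [pvDigit] using hh
  · rw [hh] at hd; exact Bool.noConfusion hd
  · rw [hh] at hs; exact Bool.noConfusion hs.1
  · rw [hh] at hs; exact Bool.noConfusion hs.2

theorem not_sign_of_digit (c : Char) (h : pvDigit c = true) : pvSign c = false := by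
  simp only [pvDigit, Bool.and_eq_true, decide_eq_true_eq] at h
  simp only [pvSign, Bool.or_eq_false_iff, beq_eq_false_iff_ne, ne_eq]
  constructor <;> rintro rfl <;> revert h <;> decide

theorem not_dot_of_digit (c : Char) (h : pvDigit c = true) : (c == '.') = false := by
  simp only [pvDigit, Bool.and_eq_true, decide_eq_true_eq] at h
  simp only [beq_eq_false_iff_ne, ne_eq]
  rintro rfl
  revert h
  decide

theorem countP_dot_split (b : List Char) :
    b.countP (fun c => !(c == '.')) + b.countP (fun c => (c == '.')) = b.length := by
  induction b with
  | nil => rfl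
  | cons c t ih =>
    rw [List.countP_cons, List.countP_cons, List.length_cons]
    by_cases h : (c == '.') = true <;>
      simp only [h, Bool.not_true, Bool.not_false, if_true, if_false,
        Bool.false_eq_true, Bool.true_eq_false] <;> omega

theorem filter_dots_length (b : List Char) :
    b.length - (b.filter (fun c => !(c == '.'))).length = b.count '.' := by
  have h1 : (b.filter (fun c => !(c == '.'))).length = b.countP (fun c => !(c == '.')) :=
    Eq.symm List.countP_eq_length_filter
  have h3 : b.count '.' = b.countP (fun c => (c == '.')) := List.count_eq_countP
  have h2 := countP_dot_split b
  omega

-- B's nonempty-all-digits test on the filtered body decides "all valid, no sign, some digit"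
theorem filter_digits_char (b : List Char) :
    (!((b.filter (fun c => !(c == '.'))) == [])
        && (b.filter (fun c => !(c == '.'))).all (fun c => '0' ≤ c && c ≤ '9'))
      = decide (b.all pvValid = true ∧ b.countP (fun c => pvSign c) = 0 ∧ b.any pvDigit = true) := by
  rcases (Bool.eq_false_or_eq_true
      (decide (b.all pvValid = true ∧ b.countP (fun c => pvSign c) = 0 ∧ b.any pvDigit = true))).symm
    with hD | hD
  · rw [hD]
    simp only [decide_eq_false_iff_not] at hD
    rcases not_and_or.mp hD with hA | hBC
    · -- some char is invalid: it survives the filter and is not a digit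
      simp only [List.all_eq_true, not_forall] at hA
      obtain ⟨c, hc, hcv⟩ := hA
      simp only [Bool.and_eq_false_iff, Bool.not_eq_true']
      right
      refine List.all_eq_false.mpr ⟨c, List.mem_filter.mpr ⟨hc, ?_⟩, ?_⟩
      · simp only [Bool.not_eq_true']
        by_contra hcd
        simp only [Bool.not_eq_false, beq_iff_eq] at hcd
        subst hcd
        exact hcv (by rfl)
      · intro hdg
        exact hcv (by simp [pvValid, hdg])
    · rcases not_and_or.mp hBC with hB | hC
      · -- a sign occurs: it survives the filter and is not a digit
        have hex : ∃ c ∈ b, pvSign c = true := by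
          by_contra hno
          push_neg at hno
          exact hB (List.countP_eq_zero.mpr (by intro c hc; simpa using hno c hc))
        obtain ⟨c, hc, hcs⟩ := hex
        simp only [Bool.and_eq_false_iff, Bool.not_eq_true']
        right
        refine List.all_eq_false.mpr ⟨c, List.mem_filter.mpr ⟨hc, ?_⟩, ?_⟩
        · simp only [Bool.not_eq_true']
          simp only [pvSign, Bool.or_eq_true, beq_iff_eq, decide_eq_true_eq] at hcs
          rcases hcs with rfl | rfl <;> rfl
        · intro hdg
          have := not_sign_of_digit c (by simpa [pvDigit] using hdg)
          rw [this] at hcs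
          exact Bool.false_ne_true hcs
      · -- no digit at all: the filtered list is empty or contains a non-digit
        simp only [List.any_eq_true, not_exists] at hC
        push_neg at hC
        rcases hF : (b.filter (fun c => !(c == '.'))) with - | ⟨c, cs⟩
        · simp [hF]
        · have hc : c ∈ b.filter (fun c => !(c == '.')) := by
            rw [hF]; exact List.mem_cons_self
          have hcb := List.mem_filter.mp hc
          simp only [Bool.and_eq_false_iff]
          right
          refine List.all_eq_false.mpr ⟨c, List.mem_cons_self, ?_⟩
          intro hdg
          exact absurd (by simpa [pvDigit] using hdg) (hC c hcb.1)
  · rw [hD]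
    simp only [decide_eq_true_eq] at hD
    obtain ⟨hA, hB, hC⟩ := hD
    simp only [Bool.and_eq_true, Bool.not_eq_true', beq_eq_false_iff_ne, ne_eq]
    constructor
    · -- nonempty: the witnessing digit survives the filter
      simp only [List.any_eq_true] at hC
      obtain ⟨c, hc, hcd⟩ := hC
      intro hnil
      have hmem : c ∈ b.filter (fun c => !(c == '.')) :=
        List.mem_filter.mpr ⟨hc, by simp [not_dot_of_digit c hcd]⟩
      rw [hnil] at hmem
      exact List.not_mem_nil hmem
    · -- all filtered chars are digits
      refine List.all_eq_true.mpr ?_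
      intro c hc
      have hcb := List.mem_filter.mp hc
      have hsn : pvSign c = false := by
        by_contra hs
        simp only [Bool.not_eq_false] at hs
        have : 0 < b.countP (fun c => pvSign c) := List.countP_pos_iff.mpr ⟨c, hcb.1, hs⟩
        omega
      have := digit_of_valid c (List.all_eq_true.mp hA c hcb.1) hsn (by simpa using hcb.2)
      simpa [pvDigit] using this

-- B's filter-based test on a body decides pvCore
theorem core_equiv (b : List Char) (is_ex : Bool) :
    (if is_ex && decide (b.length - (b.filter (fun c => !(c == '.'))).length > 0) then false
       else decide (b.length - (b.filter (fun c => !(c == '.'))).length <= 1)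
            && !((b.filter (fun c => !(c == '.'))) == [])
            && (b.filter (fun c => !(c == '.'))).all (fun c => '0' ≤ c && c ≤ '9'))
    = decide (pvCore b is_ex) := by
  rw [filter_dots_length]
  rcases (Bool.eq_false_or_eq_true is_ex).symm with hex | hex
  · subst hex
    simp only [Bool.false_and, Bool.false_eq_true, if_false]
    rw [Bool.and_assoc, filter_digits_char]
    rcases Nat.lt_or_ge 1 (b.count '.') with h | h
    · rw [decide_eq_false (by omega : ¬ b.count '.' <= 1), Bool.false_and]
      symm
      simp only [decide_eq_false_iff_not]
      rintro ⟨-, hcc, -⟩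
      omega
    · rw [decide_eq_true (by omega : b.count '.' <= 1), Bool.true_and]
      congr 1
      simp only [eq_iff_iff]
      constructor
      · rintro ⟨h1, h2, h3⟩
        exact ⟨h1, by omega, h2, h3, by simp⟩
      · rintro ⟨h1, -, h2, h3, -⟩
        exact ⟨h1, h2, h3⟩
  · subst hex
    simp only [Bool.true_and]
    rcases Nat.eq_zero_or_pos (b.count '.') with h0 | h0
    · rw [if_neg (by simp [h0])]
      rw [Bool.and_assoc, filter_digits_char]
      rw [decide_eq_true (by omega : b.count '.' <= 1), Bool.true_and]
      congr 1
      simp only [eq_iff_iff]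
      constructor
      · rintro ⟨h1, h2, h3⟩
        exact ⟨h1, by omega, h2, h3, fun _ => h0⟩
      · rintro ⟨h1, -, h2, h3, -⟩
        exact ⟨h1, h2, h3⟩
    · rw [if_pos (by simp [h0])]
      symm
      simp only [decide_eq_false_iff_not]
      rintro ⟨-, -, -, -, hc⟩
      have := hc rfl
      omega

-- A on a nonempty string decides pvM
theorem checkPart_char (sub : String) (h : Char) (t : List Char) (is_ex : Bool)
    (hl : sub.toList = h :: t) :
    checkPart sub is_ex = decide (pvM h t is_ex) := by
  have hne : (sub == "") = false := by
    simp only [beq_eq_false_iff_ne, ne_eq]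
    intro heq
    rw [heq] at hl
    simp at hl
  unfold checkPart
  rw [hne]
  simp only [Bool.false_eq_true, if_false, hl]
  rw [checkPartLoop_char (h :: t) 0 0 false (by omega) (by omega)]
  simp only [Nat.zero_add, Bool.false_or]
  have hcount : PySem.Str.count sub "." = (h :: t).count '.' := by
    have e1 : PySem.Str.count sub "." = PySem.Chars.count sub.toList ".".toList := by
      simp [PySem.Str.count_eq]
    have e2 : (".".toList) = ['.'] := rfl
    rw [e1, hl, e2, count_singleton]
  have hget : (PySem.List.pyGet? (h :: t) 0).getD ' ' = h := by
    simp [PySem.List.pyGet?, PySem.List.pyIdx?]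
  have hlen : PySem.Str.len sub = ((h :: t).length : Int) := by
    simp [PySem.Str.len_eq, hl]
  by_cases hP : (h :: t).all pvValid = true ∧ (h :: t).count '.' <= 1
      ∧ (h :: t).countP (fun c => pvSign c) <= 1
  · rw [if_pos hP]
    obtain ⟨hP1, hP2, hP3⟩ := hP
    simp only [hcount, hget, hlen]
    by_cases hnum : (h :: t).any pvDigit = true
    · simp only [hnum, Bool.not_true, Bool.false_eq_true, if_false]
      by_cases hexd : (is_ex && decide (1 <= (h :: t).count '.')) = true
      · rw [if_pos hexd]
        simp only [Bool.and_eq_true, decide_eq_true_eq] at hexd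
        symm
        simp only [decide_eq_false_iff_not]
        rintro ⟨-, -, -, -, hc, -⟩
        have := hc hexd.1
        omega
      · rw [if_neg (by simpa using hexd)]
        simp only [Bool.and_eq_true, decide_eq_true_eq, not_and] at hexd
        have hdot0 : is_ex = true → (h :: t).count '.' = 0 := by
          intro hx
          rcases Nat.eq_zero_or_pos ((h :: t).count '.') with hz | hp
          · exact hz
          · exact absurd (by omega) (hexd hx)
        by_cases hsc : ((h :: t).countP (fun c => pvSign c) == 1) = true
        · simp only [hsc, Bool.true_and]
          simp only [beq_iff_eq] at hsc
          by_cases hbad : ((!(h == '+') && !(h == '-')) || ((h :: t).length : Int) == 1) = true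
          · rw [if_pos hbad]
            symm
            simp only [decide_eq_false_iff_not]
            rintro ⟨-, -, -, -, -, hlast⟩
            obtain ⟨hs1, hs2⟩ := hlast hsc
            simp only [Bool.or_eq_true, Bool.and_eq_true, Bool.not_eq_true', beq_eq_false_iff_ne,
              ne_eq, beq_iff_eq, pvSign] at hbad hs1
            rcases hbad with ⟨hb1, hb2⟩ | hb
            · rcases hs1 with h1 | h1 <;> tauto
            · apply hs2
              exact_mod_cast hb
          · rw [if_neg (by simpa using hbad)]
            symm
            simp only [decide_eq_true_eq]
            refine ⟨hP1, hP2, by omega, hnum, hdot0, fun _ => ?_⟩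
            simp only [Bool.or_eq_true, Bool.and_eq_true, Bool.not_eq_true', beq_eq_false_iff_ne,
              ne_eq, beq_iff_eq, not_or, not_and] at hbad
            push_neg at hbad
            obtain ⟨hb1, hb2⟩ := hbad
            constructor
            · simp only [pvSign, Bool.or_eq_true, beq_iff_eq]
              by_cases hpl : h = '+'
              · exact Or.inl hpl
              · exact Or.inr (hb1 hpl)
            · intro hone
              apply hb2
              exact_mod_cast hone
        · simp only [hsc, Bool.false_and, Bool.false_eq_true, if_false]
          simp only [beq_iff_eq] at hsc
          symm
          simp only [decide_eq_true_eq]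
          exact ⟨hP1, hP2, by omega, hnum, hdot0, fun hc => absurd hc (by simpa using hsc)⟩
    · simp only [Bool.not_eq_true] at hnum
      simp only [hnum, Bool.not_false, if_true]
      symm
      simp only [decide_eq_false_iff_not]
      rintro ⟨-, -, -, hd, -⟩
      rw [hnum] at hd
      exact Bool.false_ne_true hd
  · rw [if_neg hP]
    symm
    simp only [decide_eq_false_iff_not]
    rintro ⟨h1, h2, h3, -⟩
    exact hP ⟨h1, by omega, by omega⟩

-- B on a nonempty string decides pvM
theorem checkPart_alt_char (sub : String) (h : Char) (t : List Char) (is_ex : Bool)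
    (hl : sub.toList = h :: t) :
    checkPart_alt sub is_ex = decide (pvM h t is_ex) := by
  have hne : (sub == "") = false := by
    simp only [beq_eq_false_iff_ne, ne_eq]
    intro heq
    rw [heq] at hl
    simp at hl
  unfold checkPart_alt
  rw [hne]
  simp only [Bool.false_eq_true, if_false, hl]
  have hget : (PySem.List.pyGet? (h :: t) 0).getD ' ' = h := by
    simp [PySem.List.pyGet?, PySem.List.pyIdx?]
  rw [hget]
  have hslice : PySem.List.slice (h :: t) (some 1) none = t := by
    simpa using PySem.List.slice_from_one (h :: t)
  by_cases hs : (h == '+' || h == '-') = true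
  · rw [if_pos hs, hslice, core_equiv t is_ex]
    have hsgn : pvSign h = true := by simpa [pvSign] using hs
    have hnd : (h == '.') = false := sign_not_dot h hs
    have hdig : pvDigit h = false := by simpa [pvDigit] using sign_not_digit h hs
    have hval : pvValid h = true := sign_valid h hs
    have hcnt := count_cons_not_dot h t hnd
    have hcntP := countP_cons_sign h t hs
    congr 1
    simp only [eq_iff_iff]
    constructor
    · rintro ⟨h1, h2, h3, h4, h5⟩
      refine ⟨by simp [List.all_cons, hval, h1], by omega,
        by rw [hcntP]; omega, by simp [List.any_cons, hdig, h4], by rwa [hcnt], fun _ => ⟨hsgn, ?_⟩⟩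
      have hne' : t ≠ [] := by
        rintro rfl
        rw [List.any_nil] at h4
        exact Bool.false_ne_true h4
      have hlen0 : t.length ≠ 0 := fun hz => hne' (List.eq_nil_of_length_eq_zero hz)
      simp only [List.length_cons]
      omega
    · rintro ⟨h1, h2, h3, h4, h5, -⟩
      simp only [List.all_cons, Bool.and_eq_true] at h1
      simp only [List.any_cons, hdig, Bool.false_eq_true, false_or] at h4
      exact ⟨h1.2, by omega, by rw [hcntP] at h3; omega, h4, by rw [hcnt] at h5; exact h5⟩
  · rw [if_neg hs, core_equiv (h :: t) is_ex]
    have hsgn : pvSign h = false := by simpa [pvSign] using hs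
    congr 1
    simp only [eq_iff_iff]
    constructor
    · rintro ⟨h1, h2, h3, h4, h5⟩
      exact ⟨h1, h2, by omega, h4, h5, fun hc => absurd hc (by omega)⟩
    · rintro ⟨h1, h2, h3, h4, h5, h6⟩
      refine ⟨h1, h2, ?_, h4, h5⟩
      rcases Nat.lt_or_ge ((h :: t).countP (fun c => pvSign c)) 1 with hlt | hge
      · omega
      · have h1' := (h6 (by omega)).1
        rw [hsgn] at h1'
        exact absurd h1' Bool.false_ne_true

-- ===== VERDICT (by name: the statement is the Claim_ definition above) =====
theorem checkPart_spec : Claim_equal_checkPart := by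
  intro sub is_ex _
  unfold Spec_checkPart
  rcases hl : sub.toList with - | ⟨h, t⟩
  · have hsub : sub = "" := String.toList_eq_nil_iff.mp hl
    subst hsub
    cases is_ex <;> rfl
  · rw [checkPart_char sub h t is_ex hl, checkPart_alt_char sub h t is_ex hl]
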